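-- pv_equiv track=rewrite | github.com/IKAROSOO/CodingTest | Programmers/입문 100문제/120876_03.py | solution
-- ===== SOURCE A (Python) =====
-- def solution(lines):
--     events = []
--     for a, b in lines:
--         events.append((min(a, b), 1))  # 시작점
--         events.append((max(a, b), -1)) # 끝점
--
--     events.sort() # 이벤트 정렬
--
--     overlap = 0
--     total_length = 0
--     for i in range(len(events) - 1):
--         overlap += events[i][1]
--         if overlap >= 2: # 두 개 이상의 선분이 겹치는 경우
--             total_length += events[i+1][0] - events[i][0]
--
--     return total_length
-- ===== SOURCE B (Python) =====
-- def solution(lines):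
--     # coordinate compression + direct coverage count per gap (no event list, no running overlap)
--     coords = sorted({e for line in lines for e in line})
--     total = 0
--     for x, nxt in zip(coords, coords[1:]):
--         cov = sum(1 for a, b in lines if min(a, b) <= x < max(a, b))
--         if cov >= 2:
--             total += nxt - x
--     return total
-- ===== Notes on version B (the rewrite author's own statement) =====
-- stated objective: alternative
-- what changed: Replaces the sorted (coordinate,±1) event sweep with a running overlap counter by coordinate compression: sort the distinct endpoints and, for each gap between consecutive coordinates, count the covering segments directly; trades the O(n log n) sweep for an O(n^2) but stateless direct count.
import Mathlib
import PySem

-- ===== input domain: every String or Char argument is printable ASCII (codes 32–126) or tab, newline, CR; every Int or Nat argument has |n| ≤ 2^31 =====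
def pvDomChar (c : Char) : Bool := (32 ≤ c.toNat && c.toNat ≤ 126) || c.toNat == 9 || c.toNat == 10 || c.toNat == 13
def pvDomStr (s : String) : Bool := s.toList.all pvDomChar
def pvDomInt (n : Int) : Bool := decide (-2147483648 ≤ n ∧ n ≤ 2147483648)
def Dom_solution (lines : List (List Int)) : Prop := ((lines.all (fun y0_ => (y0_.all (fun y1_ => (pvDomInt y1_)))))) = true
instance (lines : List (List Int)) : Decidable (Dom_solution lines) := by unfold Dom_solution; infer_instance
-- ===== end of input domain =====

-- B replaces A's sorted event sweep by coordinate compression with a direct coverage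
-- count per gap (alternative algorithm, not claimed faster); equal on every input where
-- A returns (lines of length 2; otherwise Python's unpacking raises ValueError).

-- ===== PORT A =====
-- 'for a, b in lines' unpacks a 2-element line; pyGetD is exact under Pre_ (length = 2)
def solution (lines : List (List Int)) : Int :=
  let events : List (Int × Int) := lines.foldl (fun evs l =>
    let a := PySem.List.pyGetD l 0 0
    let b := PySem.List.pyGetD l 1 0
    evs ++ [(min a b, (1 : Int))] ++ [(max a b, (-1 : Int))]) []
  let events := PySem.List.sorted2 events Prod.fst Prod.snd   -- events.sort(): Python tuple order
  let r := (PySem.List.pyRange 0 ((events.length : Int) - 1) 1).foldl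
    (fun (st : Int × Int) i =>
      let overlap := st.1 + (PySem.List.pyGetD events i ((0 : Int), (0 : Int))).2
      let total := if overlap ≥ 2 then
          st.2 + ((PySem.List.pyGetD events (i + 1) ((0 : Int), (0 : Int))).1
                  - (PySem.List.pyGetD events i ((0 : Int), (0 : Int))).1)
        else st.2
      (overlap, total)) ((0 : Int), (0 : Int))
  r.2

-- ===== PORT B =====
-- 'for a, b in lines' unpacks a 2-element line; pyGetD is exact under Pre_ (length = 2)
def solution_alt (lines : List (List Int)) : Int :=
  let coords := PySem.List.sorted (PySem.Set.ofList (lines.flatMap (fun l => l))) (fun x => x)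
  (coords.zip (coords.drop 1)).foldl (fun total (p : Int × Int) =>   -- zip(coords, coords[1:])
    let cov : Int := (lines.countP (fun l =>
      let a := PySem.List.pyGetD l 0 0
      let b := PySem.List.pyGetD l 1 0
      decide (min a b ≤ p.1 ∧ p.1 < max a b)) : Int)
    if cov ≥ 2 then total + (p.2 - p.1) else total) 0

-- ===== PRECONDITION & SPEC =====
-- Pre_ excludes exactly the inputs where both Pythons raise ValueError (a line that is
-- not a 2-element list cannot be unpacked by 'for a, b in lines').
def Pre_solution (lines : List (List Int)) : Prop := ∀ l ∈ lines, l.length = 2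
instance (lines : List (List Int)) : Decidable (Pre_solution lines) := by unfold Pre_solution; infer_instance
def pvWitness_solution : List (List Int) := [[0, 5], [2, 7], [4, 9]]

def Spec_solution (lines : List (List Int)) (out : Int) : Prop := out = solution_alt lines
instance (lines : List (List Int)) (out : Int) : Decidable (Spec_solution lines out) := by unfold Spec_solution; infer_instance

-- ===== CLAIM (what is proved, stated in full; the proofs are below) =====
def Claim_equal_solution : Prop := ∀ (lines : List (List Int)), Dom_solution lines → Pre_solution lines → Spec_solution lines (solution lines)

-- ===== LEMMAS AND PROOFS =====

-- the raw event list A builds (before sorting)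
def pvEvs (lines : List (List Int)) : List (Int × Int) :=
  lines.flatMap (fun l =>
    [(min (PySem.List.pyGetD l 0 0) (PySem.List.pyGetD l 1 0), (1 : Int)),
     (max (PySem.List.pyGetD l 0 0) (PySem.List.pyGetD l 1 0), (-1 : Int))])

-- structural form of A's sweep loop
def pvSweep : Int → List (Int × Int) → Int
  | _, [] => 0
  | _, [_] => 0
  | c, (x, d) :: (y, e) :: r =>
      (if c + d ≥ 2 then y - x else 0) + pvSweep (c + d) ((y, e) :: r)

-- merge adjacent events with equal coordinate
def pvMerge : List (Int × Int) → List (Int × Int)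
  | [] => []
  | [p] => [p]
  | (x, d) :: (y, e) :: r =>
      if x = y then pvMerge ((x, d + e) :: r) else (x, d) :: pvMerge ((y, e) :: r)
  termination_by es => es.length

-- sum of deltas at coordinates ≤ x
def pvCsum (x : Int) (es : List (Int × Int)) : Int :=
  (es.map (fun e => if e.1 ≤ x then e.2 else 0)).sum

-- L2: two events at the same coordinate merge
theorem pvSweep_merge (c x d1 d2 : Int) (r : List (Int × Int)) :
    pvSweep c ((x, d1) :: (x, d2) :: r) = pvSweep c ((x, d1 + d2) :: r) := by
  cases r with
  | nil => simp [pvSweep]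
  | cons p r' =>
    obtain ⟨y, e⟩ := p
    simp only [pvSweep, sub_self, ite_self, zero_add, ← add_assoc]

-- pvMerge keeps the head coordinate
theorem pvMerge_head_aux (es : List (Int × Int)) :
    ((pvMerge es).map Prod.fst).head? = (es.map Prod.fst).head? := by
  fun_induction pvMerge es with
  | case1 => rfl
  | case2 q => rfl
  | case3 x d1 d2 t ih => exact ih
  | case4 x d y e t h ih => rfl

theorem pvMerge_head (p : Int × Int) (r : List (Int × Int)) :
    ∃ d' r', pvMerge (p :: r) = (p.1, d') :: r' := by
  have h := pvMerge_head_aux (p :: r)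
  cases hm : pvMerge (p :: r) with
  | nil => rw [hm] at h; simp at h
  | cons q t =>
    rw [hm] at h; simp at h
    exact ⟨q.2, t, by rw [← h]⟩

-- L3: sweeping merged events gives the same total
theorem pvSweep_pvMerge (es : List (Int × Int)) : ∀ c, pvSweep c (pvMerge es) = pvSweep c es := by
  fun_induction pvMerge es with
  | case1 => intro c; rfl
  | case2 p => intro c; rfl
  | case3 x d1 d2 t ih =>
    intro c
    rw [ih, pvSweep_merge]
  | case4 x d y e t h ih =>
    intro c
    obtain ⟨d', r', hm⟩ := pvMerge_head (y, e) t
    rw [hm]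
    simp only [pvSweep]
    rw [← hm, ih]

-- L4: pvMerge preserves the coordinate-filtered delta sum
theorem pvCsum_pvMerge (x : Int) (es : List (Int × Int)) : pvCsum x (pvMerge es) = pvCsum x es := by
  fun_induction pvMerge es with
  | case1 => rfl
  | case2 q => rfl
  | case3 z d1 d2 t ih =>
    rw [ih]
    simp only [pvCsum, List.map_cons, List.sum_cons]
    split_ifs <;> ring
  | case4 z d y e t h ih =>
    simp only [pvCsum, List.map_cons, List.sum_cons] at *
    rw [ih]

-- membership of coordinates is preserved by pvMerge
theorem pvMerge_mem_fst (z : Int) (es : List (Int × Int)) :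
    z ∈ (pvMerge es).map Prod.fst ↔ z ∈ es.map Prod.fst := by
  fun_induction pvMerge es with
  | case1 => rfl
  | case2 q => rfl
  | case3 w d1 d2 t ih => rw [ih]; simp
  | case4 w d y e t h ih => simp only [List.map_cons, List.mem_cons] at *; rw [ih]

-- L5: merging a ≤-sorted event list yields strictly increasing coordinates
theorem pvMerge_pairwise_lt (es : List (Int × Int)) :
    (es.map Prod.fst).Pairwise (· ≤ ·) → ((pvMerge es).map Prod.fst).Pairwise (· < ·) := by
  fun_induction pvMerge es with
  | case1 => intro _; simp
  | case2 q => intro _; simp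
  | case3 w d1 d2 t ih =>
    intro hs
    apply ih
    simp only [List.map_cons, List.pairwise_cons] at hs ⊢
    exact ⟨hs.2.1, hs.2.2⟩
  | case4 w d y e t h ih =>
    intro hs
    simp only [List.map_cons, List.pairwise_cons] at hs ⊢
    constructor
    · intro z hz
      rw [pvMerge_mem_fst] at hz
      simp only [List.map_cons, List.mem_cons] at hz
      rcases hz with rfl | hz
      · exact lt_of_le_of_ne (hs.1 z (by simp)) h
      · exact lt_of_lt_of_le (lt_of_le_of_ne (hs.1 y (by simp)) h) (hs.2.1 z hz)
    · exact ih (by simp only [List.map_cons, List.pairwise_cons]; exact hs.2)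

-- L6: two strictly increasing lists with the same members are equal
theorem strictSorted_eq_of_mem_iff : ∀ (as bs : List Int), as.Pairwise (· < ·) →
    bs.Pairwise (· < ·) → (∀ z, z ∈ as ↔ z ∈ bs) → as = bs := by
  intro as
  induction as with
  | nil =>
    intro bs _ _ hm
    cases bs with
    | nil => rfl
    | cons b t => exact absurd ((hm b).2 (by simp)) (by simp)
  | cons a t ih =>
    intro bs ha hb hm
    cases bs with
    | nil => exact absurd ((hm a).1 (by simp)) (by simp)
    | cons b u =>
      simp only [List.pairwise_cons] at ha hb
      have hab : a = b := by
        have h1 := (hm a).1 (by simp)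
        have h2 := (hm b).2 (by simp)
        simp only [List.mem_cons] at h1 h2
        rcases h1 with rfl | h1
        · rfl
        · rcases h2 with rfl | h2
          · rfl
          · exact absurd (lt_trans (hb.1 a h1) (ha.1 b h2)) (lt_irrefl b)
      subst hab
      congr 1
      apply ih _ ha.2 hb.2
      intro z
      constructor
      · intro hz
        have := (hm z).1 (List.mem_cons_of_mem _ hz)
        rcases List.mem_cons.1 this with rfl | h
        · exact absurd (ha.1 z hz) (lt_irrefl z)
        · exact h
      · intro hz
        have := (hm z).2 (List.mem_cons_of_mem _ hz)
        rcases List.mem_cons.1 this with rfl | h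
        · exact absurd (hb.1 z hz) (lt_irrefl z)
        · exact h

-- Python's tuple comparison used by events.sort(), first components only
def pvLt (a b : Int × Int) : Bool :=
  decide (a.1 < b.1) || (!decide (b.1 < a.1) && decide (a.2 < b.2))

theorem insertBy_pvLt_pairwise (x : Int × Int) : ∀ (ys : List (Int × Int)),
    (ys.map Prod.fst).Pairwise (· ≤ ·) →
    ((PySem.List.insertBy pvLt x ys).map Prod.fst).Pairwise (· ≤ ·) := by
  intro ys
  induction ys with
  | nil => intro _; simp [PySem.List.insertBy]
  | cons y t ih =>
    intro hs
    simp only [List.map_cons, List.pairwise_cons] at hs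
    show ((if pvLt x y then x :: y :: t else y :: PySem.List.insertBy pvLt x t).map Prod.fst).Pairwise (· ≤ ·)
    by_cases hl : pvLt x y = true
    · rw [if_pos hl]
      have hxy : x.1 ≤ y.1 := by
        simp only [pvLt, Bool.or_eq_true, Bool.and_eq_true, Bool.not_eq_true',
          decide_eq_true_eq, decide_eq_false_iff_not] at hl
        rcases hl with h | h
        · exact le_of_lt h
        · exact not_lt.mp h.1
      simp only [List.map_cons, List.pairwise_cons]
      refine ⟨?_, hs.1, hs.2⟩
      intro z hz
      simp only [List.mem_cons] at hz
      rcases hz with rfl | hz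
      · exact hxy
      · exact le_trans hxy (hs.1 z hz)
    · rw [if_neg hl]
      have hyx : y.1 ≤ x.1 := by
        simp only [pvLt, Bool.or_eq_true, Bool.and_eq_true, Bool.not_eq_true',
          decide_eq_true_eq, decide_eq_false_iff_not] at hl
        rw [not_or] at hl
        exact not_lt.mp hl.1
      simp only [List.map_cons, List.pairwise_cons]
      constructor
      · intro z hz
        simp only [List.mem_map] at hz
        obtain ⟨p, hp, rfl⟩ := hz
        rcases (PySem.List.mem_insertBy pvLt x p t).1 hp with rfl | hp
        · exact hyx
        · exact hs.1 p.1 (List.mem_map_of_mem hp)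
      · exact ih hs.2

theorem sorted2_fst_pairwise (es : List (Int × Int)) :
    ((PySem.List.sorted2 es Prod.fst Prod.snd).map Prod.fst).Pairwise (· ≤ ·) := by
  show ((es.foldl (fun acc x => PySem.List.insertBy pvLt x acc) []).map Prod.fst).Pairwise (· ≤ ·)
  suffices h : ∀ (acc : List (Int × Int)), (acc.map Prod.fst).Pairwise (· ≤ ·) →
      ((es.foldl (fun acc x => PySem.List.insertBy pvLt x acc) acc).map Prod.fst).Pairwise (· ≤ ·) by
    exact h [] (by simp)
  induction es with
  | nil => intro acc h; exact h
  | cons e t ih =>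
    intro acc h
    exact ih _ (insertBy_pvLt_pairwise e acc h)

theorem pvCsum_eq_zero (x : Int) (gs : List (Int × Int))
    (h : ∀ z ∈ gs.map Prod.fst, x < z) : pvCsum x gs = 0 := by
  induction gs with
  | nil => rfl
  | cons g t ih =>
    simp only [pvCsum, List.map_cons, List.sum_cons] at *
    rw [if_neg (not_le.mpr (h g.1 (by simp))), ih (fun z hz => h z (by simp [hz])), zero_add]

theorem pvFoldl_shift (F : Int → Int) (l : List (Int × Int)) (t0 : Int) :
    l.foldl (fun t p => if F p.1 ≥ 2 then t + (p.2 - p.1) else t) t0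
      = t0 + l.foldl (fun t p => if F p.1 ≥ 2 then t + (p.2 - p.1) else t) 0 := by
  induction l generalizing t0 with
  | nil => simp
  | cons p t ih =>
    simp only [List.foldl_cons]
    rw [ih, ih (if F p.1 ≥ 2 then 0 + (p.2 - p.1) else 0)]
    split_ifs <;> ring

-- M: a strictly sorted merged sweep is the zip-fold with the global coverage function
theorem pvSweep_eq_zipfold (F : Int → Int) : ∀ (c : Int) (gs : List (Int × Int)),
    ((gs.map Prod.fst).Pairwise (· < ·)) →
    (∀ x ∈ gs.map Prod.fst, F x = c + pvCsum x gs) →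
    pvSweep c gs = ((gs.map Prod.fst).zip ((gs.map Prod.fst).drop 1)).foldl
        (fun t p => if F p.1 ≥ 2 then t + (p.2 - p.1) else t) 0 := by
  intro c gs
  fun_induction pvSweep c gs with
  | case1 c => intro _ _; rfl
  | case2 c p => intro _ _; rfl
  | case3 c x d y e r ih =>
    intro hs hF
    have hxall : ∀ z ∈ ((y, e) :: r).map Prod.fst, x < z := by
      simp only [List.map_cons, List.pairwise_cons] at hs
      exact hs.1
    have hFx : F x = c + d := by
      rw [hF x (by simp)]
      simp only [pvCsum, List.map_cons, List.sum_cons, if_pos (le_refl x)]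
      have : pvCsum x ((y, e) :: r) = 0 := pvCsum_eq_zero x _ hxall
      simp only [pvCsum, List.map_cons, List.sum_cons] at this
      omega
    have hF' : ∀ z ∈ ((y, e) :: r).map Prod.fst, F z = (c + d) + pvCsum z ((y, e) :: r) := by
      intro z hz
      rw [hF z (by simp only [List.map_cons] at *; exact List.mem_cons_of_mem _ hz)]
      simp only [pvCsum, List.map_cons, List.sum_cons]
      rw [if_pos (le_of_lt (hxall z hz))]
      ring
    have hs' : (((y, e) :: r).map Prod.fst).Pairwise (· < ·) := by
      simp only [List.map_cons, List.pairwise_cons] at hs ⊢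
      exact hs.2
    have hzip : ((((x, d) :: (y, e) :: r).map Prod.fst).zip
          ((((x, d) :: (y, e) :: r).map Prod.fst).drop 1))
        = (x, y) :: ((((y, e) :: r).map Prod.fst).zip ((((y, e) :: r).map Prod.fst).drop 1)) := by
      simp
    rw [hzip, List.foldl_cons, pvFoldl_shift]
    rw [ih hs' hF', hFx]
    split_ifs <;> ring

-- the body of A's index loop
def pvBody (es : List (Int × Int)) : (Int × Int) → Int → (Int × Int) := fun st i =>
  let overlap := st.1 + (PySem.List.pyGetD es i ((0 : Int), (0 : Int))).2
  let total := if overlap ≥ 2 then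
      st.2 + ((PySem.List.pyGetD es (i + 1) ((0 : Int), (0 : Int))).1
              - (PySem.List.pyGetD es i ((0 : Int), (0 : Int))).1)
    else st.2
  (overlap, total)

theorem pvShift (e : Int × Int) (es : List (Int × Int)) (st : Int × Int) :
    (PySem.List.pyRange 1 ((es.length : Int)) 1).foldl (pvBody (e :: es)) st
      = (PySem.List.pyRange 0 ((es.length : Int) - 1) 1).foldl (pvBody es) st := by
  rw [PySem.List.pyRange_one, PySem.List.pyRange_one, sub_zero]
  rw [List.foldl_map, List.foldl_map]
  have hfun : (fun (st : Int × Int) (k : Nat) => pvBody (e :: es) st (1 + ↑k))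
      = (fun (st : Int × Int) (k : Nat) => pvBody es st (0 + ↑k)) := by
    funext st k
    have h1 : ((1 : Int) + ↑k) = ((k + 1 : Nat) : Int) := by push_cast; ring
    have h2 : ((0 : Int) + ↑k) = ((k : Nat) : Int) := by omega
    have h3 : (((k + 1 : Nat) : Int) + 1) = ((k + 2 : Nat) : Int) := by push_cast; ring
    have h4 : (((k : Nat) : Int) + 1) = ((k + 1 : Nat) : Int) := by push_cast; ring
    simp only [pvBody, h1, h2, h3, h4, PySem.List.pyGetD_natCast]
    simp
  rw [hfun]

theorem pvLoop (es : List (Int × Int)) : ∀ c t,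
    ((PySem.List.pyRange 0 ((es.length : Int) - 1) 1).foldl (pvBody es) (c, t)).2
      = t + pvSweep c es := by
  induction es with
  | nil => intro c t; rw [PySem.List.pyRange_one_eq_nil (by simp)]; simp [pvSweep]
  | cons e1 t1 ih =>
    intro c t
    cases t1 with
    | nil => rw [PySem.List.pyRange_one_eq_nil (by simp)]; simp [pvSweep]
    | cons e2 r =>
      rw [PySem.List.pyRange_one_cons (by simp)]
      rw [List.foldl_cons]
      have hb : pvBody (e1 :: e2 :: r) ((c, t)) 0
          = (c + e1.2, if c + e1.2 ≥ 2 then t + (e2.1 - e1.1) else t) := by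
        simp [pvBody, PySem.List.pyGetD_ofNat']
      rw [hb]
      have hlen : ((e1 :: e2 :: r).length : Int) - 1 = (((e2 :: r).length : Nat) : Int) := by
        simp
      rw [hlen]
      simp only [zero_add]
      rw [pvShift e1 (e2 :: r), ih]
      simp only [pvSweep]
      split_ifs <;> ring

-- coverage at x, as B counts it
def pvCov (lines : List (List Int)) (x : Int) : Int :=
  (lines.countP (fun l =>
    decide (min (PySem.List.pyGetD l 0 0) (PySem.List.pyGetD l 1 0) ≤ x ∧
            x < max (PySem.List.pyGetD l 0 0) (PySem.List.pyGetD l 1 0))) : Int)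

theorem pvFold_evs (lines : List (List Int)) : ∀ (acc : List (Int × Int)),
    lines.foldl (fun evs l =>
      let a := PySem.List.pyGetD l 0 0
      let b := PySem.List.pyGetD l 1 0
      evs ++ [(min a b, (1 : Int))] ++ [(max a b, (-1 : Int))]) acc = acc ++ pvEvs lines := by
  induction lines with
  | nil => intro acc; simp [pvEvs]
  | cons l t ih =>
    intro acc
    simp only [List.foldl_cons, pvEvs, List.flatMap_cons] at *
    rw [ih]
    simp

-- L8: B's direct count equals the coordinate-filtered delta sum of the raw events
theorem pvCsum_evs (x : Int) (lines : List (List Int)) :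
    pvCsum x (pvEvs lines) = pvCov lines x := by
  induction lines with
  | nil => rfl
  | cons l t ih =>
    simp only [pvEvs, List.flatMap_cons, pvCsum, List.map_append, List.sum_append,
      pvCov, List.countP_cons] at *
    push_cast
    rw [← ih]
    have hmm : min (PySem.List.pyGetD l 0 0) (PySem.List.pyGetD l 1 0)
        ≤ max (PySem.List.pyGetD l 0 0) (PySem.List.pyGetD l 1 0) := min_le_max
    simp only [List.map_cons, List.map_nil, List.sum_cons, List.sum_nil, decide_eq_true_eq]
    split_ifs <;> omega

-- events' coordinates are exactly the endpoints (uses Pre_: every line is a pair)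
theorem pvEvs_mem_fst (lines : List (List Int)) (hp : Pre_solution lines) (z : Int) :
    z ∈ (pvEvs lines).map Prod.fst ↔ z ∈ lines.flatMap (fun l => l) := by
  induction lines with
  | nil => simp [pvEvs]
  | cons l t ih =>
    obtain ⟨a, b, rfl⟩ := List.length_eq_two.mp (hp l (by simp))
    have ih' := ih (fun l' hl' => hp l' (List.mem_cons_of_mem _ hl'))
    have hg0 : PySem.List.pyGetD [a, b] 0 (0 : Int) = a := by
      simp [PySem.List.pyGetD_zero_cons]
    have hg1 : PySem.List.pyGetD [a, b] 1 (0 : Int) = b := by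
      simp [PySem.List.pyGetD_ofNat']
    simp only [pvEvs, List.flatMap_cons, List.map_append, List.mem_append] at ih' ⊢
    rw [ih']
    simp only [hg0, hg1, List.map_cons, List.map_nil, List.mem_cons, List.not_mem_nil, or_false]
    by_cases hab : a ≤ b <;> simp [min_def, max_def, hab] <;> tauto

theorem solution_spec : Claim_equal_solution := by
  intro lines _ hpre
  show solution lines = solution_alt lines
  have hA0 : solution lines
      = ((PySem.List.pyRange 0
            (((PySem.List.sorted2 (pvEvs lines) Prod.fst Prod.snd).length : Int) - 1) 1).foldl
          (pvBody (PySem.List.sorted2 (pvEvs lines) Prod.fst Prod.snd)) ((0 : Int), (0 : Int))).2 := by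
    unfold solution
    simp only [pvFold_evs lines [], List.nil_append]
    rfl
  have hperm : (PySem.List.sorted2 (pvEvs lines) Prod.fst Prod.snd).Perm (pvEvs lines) :=
    PySem.List.sorted2_perm _ _ _ _
  have hpair := sorted2_fst_pairwise (pvEvs lines)
  have hlt := pvMerge_pairwise_lt _ hpair
  have hF : ∀ x ∈ ((pvMerge (PySem.List.sorted2 (pvEvs lines) Prod.fst Prod.snd)).map Prod.fst),
      pvCov lines x = 0 + pvCsum x (pvMerge (PySem.List.sorted2 (pvEvs lines) Prod.fst Prod.snd)) := by
    intro x _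
    rw [zero_add, pvCsum_pvMerge]
    have h1 : pvCsum x (PySem.List.sorted2 (pvEvs lines) Prod.fst Prod.snd)
        = pvCsum x (pvEvs lines) := List.Perm.sum_eq (hperm.map _)
    rw [h1, pvCsum_evs]
  have hcs : (pvMerge (PySem.List.sorted2 (pvEvs lines) Prod.fst Prod.snd)).map Prod.fst
      = PySem.List.sorted (PySem.Set.ofList (lines.flatMap (fun l => l))) (fun x => x) := by
    apply strictSorted_eq_of_mem_iff _ _ hlt (PySem.List.sorted_ofList_pairwise_lt _)
    intro z
    rw [pvMerge_mem_fst, (hperm.map Prod.fst).mem_iff, pvEvs_mem_fst lines hpre,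
      PySem.List.mem_sorted, PySem.Set.mem_ofList]
  rw [hA0, pvLoop, zero_add, ← pvSweep_pvMerge,
    pvSweep_eq_zipfold (pvCov lines) 0 _ hlt hF, hcs]
  rfl
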